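-- pv_equiv track=rewrite | github.com/pratham1singh/GFG-geeks-for-geeks-solutions | Array Operations - GFG/array-operations.py | arrayOperations
-- ===== SOURCE A (Python) =====
-- from typing import List
--
-- def arrayOperations(n : int, arr : List[int]) -> int:
--     c=0
--     i=0
--     if 0 not in arr:
--         return -1
--     while i<n:
--
--         if arr[i]!=0:
--             c+=1
--             while i<n and arr[i]!=0:
--                 i+=1
--         i+=1
--     return c
-- ===== SOURCE B (Python) =====
-- from typing import List
--
-- def arrayOperations(n : int, arr : List[int]) -> int:
--     if 0 not in arr:
--         return -1
--     pre = arr[:max(0, n)]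
--     nonzeros = sum(1 for x in pre if x != 0)
--     adjacent = sum(1 for x, y in zip(pre, pre[1:]) if x != 0 and y != 0)
--     return nonzeros - adjacent
-- ===== Notes on version B (the rewrite author's own statement) =====
-- stated objective: alternative
-- what changed: Replaces A's run-detection loop (nested skip-loop over indices) with an arithmetic identity: the number of maximal nonzero runs in the prefix equals the count of nonzero elements minus the count of adjacent nonzero pairs, computed by two independent zip/filter passes with no boundary or run detection.
import Mathlib
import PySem

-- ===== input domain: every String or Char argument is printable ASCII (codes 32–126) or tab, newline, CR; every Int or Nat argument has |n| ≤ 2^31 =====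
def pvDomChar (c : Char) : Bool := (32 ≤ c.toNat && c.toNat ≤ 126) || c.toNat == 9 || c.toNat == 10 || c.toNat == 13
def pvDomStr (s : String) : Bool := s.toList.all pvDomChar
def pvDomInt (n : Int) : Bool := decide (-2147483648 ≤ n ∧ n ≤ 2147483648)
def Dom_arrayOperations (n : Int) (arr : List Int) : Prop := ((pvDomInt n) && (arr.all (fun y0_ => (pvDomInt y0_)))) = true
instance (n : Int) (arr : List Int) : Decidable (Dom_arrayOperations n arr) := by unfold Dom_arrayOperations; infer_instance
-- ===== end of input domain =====

-- B replaces A's run-detection loop by the identity: #runs = #nonzeros − #adjacent-nonzero-pairs.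

-- ===== PORT A =====
-- inner loop: 'while i<n and arr[i]!=0: i+=1'
def aInner (n : Int) (arr : List Int) (i : Int) : Int :=
  if _h : i < n ∧ PySem.List.pyGetD arr i 0 ≠ 0 then aInner n arr (i + 1) else i
termination_by (n - i).toNat
decreasing_by omega

-- termination fact for the outer loop (cited in its decreasing_by)
theorem aInner_ge (n : Int) (arr : List Int) (i : Int) : i ≤ aInner n arr i := by
  unfold aInner
  split
  · have := aInner_ge n arr (i + 1)
    omega
  · omega
termination_by (n - i).toNat
decreasing_by omega

-- outer loop: 'while i<n: if arr[i]!=0: c+=1; <inner>; i+=1'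
def aOuter (n : Int) (arr : List Int) (i c : Int) : Int :=
  if _h : i < n then
    if PySem.List.pyGetD arr i 0 ≠ 0 then
      aOuter n arr (aInner n arr (i + 1) + 1) (c + 1)
    else
      aOuter n arr (i + 1) c
  else c
termination_by (n - i).toNat
decreasing_by
  · have := aInner_ge n arr (i + 1); omega
  · omega

def arrayOperations (n : Int) (arr : List Int) : Int :=
  if !(arr.contains 0) then -1
  else aOuter n arr 0 0

-- ===== PORT B =====
-- pre = arr[:max(0, n)]; nonzeros = sum(1 for x in pre if x != 0);
-- adjacent = sum(1 for x, y in zip(pre, pre[1:]) if x != 0 and y != 0); return nonzeros - adjacent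
def arrayOperations_alt (n : Int) (arr : List Int) : Int :=
  if !(arr.contains 0) then -1
  else
    let pre := PySem.List.slice arr none (some (max 0 n))
    let nonzeros : Int := (pre.countP (fun x => x != 0) : Int)
    let adjacent : Int :=
      ((pre.zip (PySem.List.slice pre (some 1) none)).countP
        (fun p => p.1 != 0 && p.2 != 0) : Int)
    nonzeros - adjacent

-- ===== PRECONDITION & SPEC =====
-- Pre_ excludes exactly the inputs where A raises IndexError: a zero present and n > len(arr).
def Pre_arrayOperations (n : Int) (arr : List Int) : Prop :=
  0 ∈ arr → n ≤ (arr.length : Int)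
instance (n : Int) (arr : List Int) : Decidable (Pre_arrayOperations n arr) := by
  unfold Pre_arrayOperations; infer_instance
def pvWitness_arrayOperations : Int × List Int := (3, [1, 0, 2])

def Spec_arrayOperations (n : Int) (arr : List Int) (out : Int) : Prop := out = arrayOperations_alt n arr
instance (n : Int) (arr : List Int) (out : Int) : Decidable (Spec_arrayOperations n arr out) := by unfold Spec_arrayOperations; infer_instance

-- ===== CLAIM (what is proved, stated in full; the proofs are below) =====
def Claim_equal_arrayOperations : Prop := ∀ (n : Int) (arr : List Int), Dom_arrayOperations n arr → Pre_arrayOperations n arr → Spec_arrayOperations n arr (arrayOperations n arr)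

-- ===== LEMMAS AND PROOFS =====

-- number of run-start positions, carried as a list recursion with a 'previous element nonzero' flag
def runsL : List Int → Bool → Int
  | [], _ => 0
  | x :: t, prev => (if x ≠ 0 ∧ prev = false then 1 else 0) + runsL t (decide (x ≠ 0))

-- B's arithmetic identity: runsL l prev = #nonzeros − #adjacent-nonzero-pairs − (1 if the virtual pair (prev, head) is nonzero-nonzero)
theorem runsL_eq_sub (l : List Int) (prev : Bool) :
    runsL l prev
      = (l.countP (fun x => x != 0) : Int)
        - ((l.zip l.tail).countP (fun p => p.1 != 0 && p.2 != 0) : Int)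
        - (if prev = true ∧ l.headD 0 ≠ 0 then 1 else 0) := by
  induction l generalizing prev with
  | nil => simp [runsL]
  | cons x t ih =>
    cases t with
    | nil =>
      simp only [runsL, List.countP_cons, List.countP_nil, List.zip_nil_right, List.tail]
      by_cases hx : x = 0 <;> cases prev <;> simp [hx]
    | cons y t' =>
      have ih' := ih (decide (x ≠ 0))
      simp only [runsL] at ih' ⊢
      rw [ih']
      simp only [List.tail, List.zip_cons_cons, List.countP_cons, List.headD]
      by_cases hx : x = 0 <;> by_cases hy : y = 0 <;> cases prev <;>
        (simp [hx, hy]; try omega)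

-- 'arr[i] != 0 and (i == 0 or arr[i-1] == 0)' — the run-start condition A's loop effectively counts
def bCond (arr : List Int) (i : Int) : Bool :=
  (PySem.List.pyGetD arr i 0 != 0) && (i == 0 || PySem.List.pyGetD arr (i - 1) 0 == 0)

-- characterisation of the inner loop: it stops at the first j ≥ i with j ≥ n or arr[j] = 0
theorem aInner_spec (n : Int) (arr : List Int) (i : Int) :
    (∀ j, i ≤ j → j < aInner n arr i → PySem.List.pyGetD arr j 0 ≠ 0) ∧
    (aInner n arr i < n → PySem.List.pyGetD arr (aInner n arr i) 0 = 0) := by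
  unfold aInner
  split
  · rename_i h
    have ih := aInner_spec n arr (i + 1)
    refine ⟨fun j hij hjlt => ?_, ih.2⟩
    rcases eq_or_lt_of_le hij with rfl | hlt
    · exact h.2
    · exact ih.1 j (by omega) hjlt
  · rename_i h
    exact ⟨fun j hij hjlt => absurd hij (by omega), fun hlt => by
      by_contra hne; exact h ⟨hlt, hne⟩⟩
termination_by (n - i).toNat
decreasing_by omega

-- bCond is false on an index strictly inside or just after a nonzero run
theorem countP_zero_of_run (arr : List Int) (a b : Int)
    (h : ∀ j, a ≤ j → j < b → PySem.List.pyGetD arr (j - 1) 0 ≠ 0) (ha : 1 ≤ a) :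
    (PySem.List.pyRange a b 1).countP (bCond arr) = 0 := by
  rw [List.countP_eq_zero]
  intro x hx
  rw [PySem.List.mem_pyRange_one] at hx
  simp only [bCond, Bool.and_eq_true, Bool.or_eq_true, beq_iff_eq, bne_iff_ne, ne_eq]
  rintro ⟨-, h0 | hprev⟩
  · omega
  · exact h x hx.1 hx.2 hprev

-- loop invariant: at every outer-loop entry i is 0 or follows a zero, and the
-- remaining loop adds exactly the number of run-start positions in [i, n)
set_option maxHeartbeats 1000000 in
theorem aOuter_eq (n : Int) (arr : List Int) (i c : Int) (h0 : 0 ≤ i)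
    (hinv : i = 0 ∨ PySem.List.pyGetD arr (i - 1) 0 = 0) :
    aOuter n arr i c = c + ((PySem.List.pyRange i n 1).countP (bCond arr) : Int) := by
  unfold aOuter
  split
  · rename_i hin
    rw [PySem.List.pyRange_one_cons hin]
    by_cases hgi : PySem.List.pyGetD arr i 0 ≠ 0
    · simp only [if_pos hgi]
      have hb : bCond arr i = true := by
        simp only [bCond, Bool.and_eq_true, Bool.or_eq_true, beq_iff_eq, bne_iff_ne, ne_eq]
        exact ⟨hgi, hinv⟩
      set p := aInner n arr (i + 1) with hp
      have hple : i + 1 ≤ p := aInner_ge n arr (i + 1)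
      have hspec := aInner_spec n arr (i + 1)
      have hrun : ∀ j, i + 1 ≤ j → j < min (p + 1) n → PySem.List.pyGetD arr (j - 1) 0 ≠ 0 := by
        intro j h1 h2
        rcases eq_or_lt_of_le h1 with rfl | hlt
        · have he : i + 1 - 1 = i := by omega
          rw [he]; exact hgi
        · exact hspec.1 (j - 1) (by omega) (by omega)
      by_cases hpn : p < n
      · have ih := aOuter_eq n arr (p + 1) (c + 1) (by omega)
          (Or.inr (by have he : p + 1 - 1 = p := by omega
                      rw [he]; exact hspec.2 hpn))
        rw [ih]
        have hsplit := PySem.List.pyRange_one_append (i + 1) (p + 1) n (by omega) (by omega)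
        rw [hsplit, List.countP_cons, List.countP_append,
          countP_zero_of_run arr (i + 1) (p + 1) (fun j h1 h2 => hrun j h1 (by omega)) (by omega)]
        simp [hb]
        omega
      · have hend : aOuter n arr (p + 1) (c + 1) = c + 1 := by
          unfold aOuter; rw [dif_neg (by omega)]
        rw [hend, List.countP_cons,
          countP_zero_of_run arr (i + 1) n (fun j h1 h2 => hrun j h1 (by omega)) (by omega)]
        simp [hb]
    · simp only [if_neg hgi]
      have hgi' : PySem.List.pyGetD arr i 0 = 0 := not_ne_iff.mp hgi
      have ih := aOuter_eq n arr (i + 1) c (by omega)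
        (Or.inr (by have he : i + 1 - 1 = i := by omega
                    rw [he]; exact hgi'))
      rw [ih, List.countP_cons]
      have hb : bCond arr i = false := by
        simp [bCond, hgi']
      simp [hb]
  · rename_i hin
    rw [PySem.List.pyRange_one_eq_nil (by omega)]
    simp
termination_by (n - i).toNat
decreasing_by
  · have := aInner_ge n arr (i + 1); omega
  · omega

-- counting run-start indices over [i, n) equals runsL over the corresponding element list
theorem countP_bCond_eq_runsL (arr : List Int) (i n : Int) (h0 : 0 ≤ i) :
    ((PySem.List.pyRange i n 1).countP (bCond arr) : Int)
      = runsL ((PySem.List.pyRange i n 1).map (fun j => PySem.List.pyGetD arr j 0))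
              (decide (i ≠ 0 ∧ PySem.List.pyGetD arr (i - 1) 0 ≠ 0)) := by
  by_cases hin : i < n
  · rw [PySem.List.pyRange_one_cons hin, List.countP_cons, List.map_cons]
    have ih := countP_bCond_eq_runsL arr (i + 1) n (by omega)
    have he : i + 1 - 1 = i := by omega
    rw [he] at ih
    simp only [runsL]
    have hflag : (decide (i + 1 ≠ 0 ∧ PySem.List.pyGetD arr i 0 ≠ 0))
        = decide (PySem.List.pyGetD arr i 0 ≠ 0) := by
      by_cases h : PySem.List.pyGetD arr i 0 = 0 <;> simp [h] <;> omega
    rw [← hflag, ← ih]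
    by_cases hx : PySem.List.pyGetD arr i 0 = 0
    · have hb : bCond arr i = false := by simp [bCond, hx]
      simp [hb, hx]
    · by_cases hp : i ≠ 0 ∧ PySem.List.pyGetD arr (i - 1) 0 ≠ 0
      · have hb : bCond arr i = false := by
          simp only [bCond, Bool.and_eq_true, Bool.or_eq_true, beq_iff_eq, bne_iff_ne, ne_eq,
            Bool.eq_false_iff]
          rintro ⟨-, h0' | hprev⟩
          · exact hp.1 h0'
          · exact hp.2 hprev
        simp [hb, hx, hp]
      · have hb : bCond arr i = true := by
          simp only [bCond, Bool.and_eq_true, Bool.or_eq_true, beq_iff_eq, bne_iff_ne, ne_eq]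
          refine ⟨hx, ?_⟩
          by_cases hi0 : i = 0
          · exact Or.inl hi0
          · right; by_contra hne; exact hp ⟨hi0, hne⟩
        simp [hb, hx, hp]
        omega
  · rw [PySem.List.pyRange_one_eq_nil (by omega)]
    simp [runsL]
termination_by (n - i).toNat
decreasing_by omega

-- the element list of [0, n) is the prefix arr.take n.toNat, when n ≤ len arr
theorem map_pyGetD_range_eq_take (arr : List Int) (n : Int) (hn : n ≤ (arr.length : Int)) :
    (PySem.List.pyRange 0 n 1).map (fun j => PySem.List.pyGetD arr j 0) = arr.take n.toNat := by
  apply List.ext_getElem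
  · simp [PySem.List.length_pyRange_one]
    omega
  · intro k h1 h2
    simp only [List.getElem_map, List.getElem_take]
    rw [PySem.List.getElem_pyRange_one]
    have hk : k < n.toNat := by
      simp at h2
      omega
    have : (0 : Int) + k = ((k : Nat) : Int) := by omega
    rw [this, PySem.List.pyGetD_natCast]
    rw [List.getD_eq_getElem?_getD, List.getElem?_eq_getElem (by omega)]
    rfl

-- ===== VERDICT (by name: the statement is the Claim_ definition above) =====
theorem arrayOperations_spec : Claim_equal_arrayOperations := by
  intro n arr _ hpre
  unfold Spec_arrayOperations arrayOperations arrayOperations_alt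
  split
  · rfl
  · rename_i hz
    have hmem : 0 ∈ arr := by
      simp only [Bool.not_eq_true', Bool.not_eq_false] at hz
      simpa using hz
    have hlen : n ≤ (arr.length : Int) := hpre hmem
    have hmax : (0 : Int) ≤ max 0 n := le_max_left _ _
    rw [PySem.List.slice_to _ hmax]
    simp only [PySem.List.slice_from_one]
    set pre := arr.take (max 0 n).toNat with hpredef
    have hpre_eq : pre = arr.take n.toNat := by
      by_cases hn : 0 ≤ n
      · rw [hpredef, max_eq_right hn]
      · rw [hpredef]
        have h1 : (max 0 n).toNat = 0 := by omega
        have h2 : n.toNat = 0 := by omega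
        rw [h1, h2]
    rw [aOuter_eq n arr 0 0 le_rfl (Or.inl rfl),
        countP_bCond_eq_runsL arr 0 n le_rfl,
        map_pyGetD_range_eq_take arr n hlen, ← hpre_eq]
    have hd : (decide ((0 : Int) ≠ 0 ∧ PySem.List.pyGetD arr (0 - 1) 0 ≠ 0)) = false := by simp
    rw [hd, zero_add, runsL_eq_sub pre false]
    simp
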